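-- pv_equiv track=rewrite | github.com/LucianoAAP/trybe-exercises | exercises/bloco-36/arrays/ex.py | get_number_of_communicating_servers
-- ===== SOURCE A (Python) =====
-- def get_number_of_communicating_servers(array):
--     servers = []
--     count = 0
--
--     for index1, line in enumerate(array):
--         for index2, item in enumerate(line):
--             if item == 1:
--                 servers.append((index1, index2))
--
--     for server in servers:
--         if (
--             (server[0], server[1] + 1) in servers
--             or (server[0], server[1] - 1) in servers
--             or (server[0] + 1, server[1]) in servers
--             or (server[0] - 1, server[1]) in servers
--         ):
--             count += 1
--
--     return count
-- ===== SOURCE B (Python) =====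
-- def get_number_of_communicating_servers(array):
--     communicating = set()
--     # horizontal links: both endpoints of each adjacent same-row pair of servers
--     for i, row in enumerate(array):
--         for j in range(len(row) - 1):
--             if row[j] == 1 and row[j + 1] == 1:
--                 communicating.add((i, j))
--                 communicating.add((i, j + 1))
--     # vertical links: both endpoints of each adjacent same-column pair of servers
--     for i in range(len(array) - 1):
--         top, bottom = array[i], array[i + 1]
--         for j in range(min(len(top), len(bottom))):
--             if top[j] == 1 and bottom[j] == 1:
--                 communicating.add((i, j))
--                 communicating.add((i + 1, j))
--     return len(communicating)
-- ===== Notes on version B (the rewrite author's own statement) =====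
-- stated objective: alternative
-- what changed: B is edge-based instead of vertex-based: it enumerates adjacent server PAIRS (horizontal within a row, vertical between consecutive rows), collects the endpoints of those links in a set, and returns its size, replacing A's coordinate list and per-server linear membership scans.
import Mathlib
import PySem

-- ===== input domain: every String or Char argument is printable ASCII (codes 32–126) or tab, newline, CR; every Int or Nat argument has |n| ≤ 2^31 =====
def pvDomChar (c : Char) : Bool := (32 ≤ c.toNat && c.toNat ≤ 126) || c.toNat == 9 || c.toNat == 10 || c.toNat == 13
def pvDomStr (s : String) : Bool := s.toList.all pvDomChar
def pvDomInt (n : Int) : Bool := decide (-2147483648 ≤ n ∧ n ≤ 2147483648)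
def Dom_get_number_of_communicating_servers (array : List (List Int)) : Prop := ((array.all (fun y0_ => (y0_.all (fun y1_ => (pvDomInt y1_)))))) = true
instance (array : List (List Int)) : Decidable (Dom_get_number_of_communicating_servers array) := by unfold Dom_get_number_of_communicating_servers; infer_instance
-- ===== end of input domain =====

-- B is edge-based instead of vertex-based: it enumerates adjacent server pairs and
-- collects their endpoints in a set, returning its size (objective: alternative).

-- ===== PORT A =====
-- the first loop of A: collect the coordinates of all 1-cells
def pvServersOf (array : List (List Int)) : List (Int × Int) :=
  (PySem.List.enumerate array).foldl (fun acc p =>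
    (PySem.List.enumerate p.2).foldl (fun acc2 q =>
      if q.2 = 1 then acc2 ++ [(p.1, q.1)] else acc2) acc) []

def get_number_of_communicating_servers (array : List (List Int)) : Int :=
  (pvServersOf array).foldl (fun count s =>
    if (s.1, s.2 + 1) ∈ pvServersOf array ∨ (s.1, s.2 - 1) ∈ pvServersOf array ∨
       (s.1 + 1, s.2) ∈ pvServersOf array ∨ (s.1 - 1, s.2) ∈ pvServersOf array
    then count + 1 else count) 0

-- ===== PORT B =====
-- first loop of Source B: add both endpoints of every horizontal link (adjacent same-row server pair)
def pvHoriz (array : List (List Int)) : PySem.Set (Int × Int) :=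
  (PySem.List.enumerate array).foldl (fun s p =>
    (PySem.List.pyRange 0 ((p.2.length : Int) - 1) 1).foldl (fun s2 j =>
      if PySem.List.pyGetD p.2 j 0 = 1 ∧ PySem.List.pyGetD p.2 (j + 1) 0 = 1 then
        PySem.Set.add (PySem.Set.add s2 (p.1, j)) (p.1, j + 1)
      else s2) s) PySem.Set.empty

-- second loop of Source B: add both endpoints of every vertical link (adjacent same-column server pair)
def pvVert (array : List (List Int)) (s0 : PySem.Set (Int × Int)) : PySem.Set (Int × Int) :=
  (PySem.List.pyRange 0 ((array.length : Int) - 1) 1).foldl (fun s i =>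
    let top := PySem.List.pyGetD array i []
    let bottom := PySem.List.pyGetD array (i + 1) []
    (PySem.List.pyRange 0 (min (top.length : Int) (bottom.length : Int)) 1).foldl (fun s2 j =>
      if PySem.List.pyGetD top j 0 = 1 ∧ PySem.List.pyGetD bottom j 0 = 1 then
        PySem.Set.add (PySem.Set.add s2 (i, j)) (i + 1, j)
      else s2) s) s0

def get_number_of_communicating_servers_alt (array : List (List Int)) : Int :=
  ((pvVert array (pvHoriz array)).length : Int)

-- ===== PRECONDITION & SPEC =====
def Spec_get_number_of_communicating_servers (array : List (List Int)) (out : Int) : Prop := out = get_number_of_communicating_servers_alt array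
instance (array : List (List Int)) (out : Int) : Decidable (Spec_get_number_of_communicating_servers array out) := by unfold Spec_get_number_of_communicating_servers; infer_instance

-- ===== CLAIM (what is proved, stated in full; the proofs are below) =====
def Claim_equal_get_number_of_communicating_servers : Prop := ∀ (array : List (List Int)), Dom_get_number_of_communicating_servers array → Spec_get_number_of_communicating_servers array (get_number_of_communicating_servers array)

-- ===== LEMMAS AND PROOFS =====

-- proof-level bridge predicate: (i, j) is an in-range coordinate of a 1-cell
def pvCell (array : List (List Int)) (i j : Int) : Bool :=
  if 0 ≤ i ∧ i < (array.length : Int) then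
    if 0 ≤ j ∧ j < ((array.getD i.toNat []).length : Int) then
      (array.getD i.toNat []).getD j.toNat 0 == 1
    else false
  else false

theorem pvCell_iff (array : List (List Int)) (a b : Int) :
    pvCell array a b = true ↔ ∃ (k : Nat) (hk : k < array.length) (l : Nat) (_ : l < array[k].length),
      array[k][l] = 1 ∧ a = (k : Int) ∧ b = (l : Int) := by
  unfold pvCell
  constructor
  · intro h
    split_ifs at h with h1 h2
    · have hk : a.toNat < array.length := by omega
      rw [List.getD_eq_getElem array [] hk] at h2 h
      have hl : b.toNat < array[a.toNat].length := by omega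
      rw [List.getD_eq_getElem _ 0 hl] at h
      exact ⟨a.toNat, hk, b.toNat, hl, by simpa using h, by omega, by omega⟩
  · rintro ⟨k, hk, l, hl, hv, rfl, rfl⟩
    rw [if_pos (by constructor <;> [omega; exact_mod_cast hk]), Int.toNat_natCast,
      List.getD_eq_getElem array [] hk]
    rw [if_pos (by constructor <;> [omega; exact_mod_cast hl]), Int.toNat_natCast,
      List.getD_eq_getElem _ 0 hl]
    simpa using hv

-- A's coordinate list as a flatMap
theorem pvServersOf_eq (array : List (List Int)) :
    pvServersOf array = (PySem.List.enumerate array).flatMap (fun p =>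
      ((PySem.List.enumerate p.2).filter (fun q => decide (q.2 = 1))).map (fun q => (p.1, q.1))) := by
  unfold pvServersOf
  rw [show (fun (acc : List (Int × Int)) (p : Int × List Int) =>
      (PySem.List.enumerate p.2).foldl (fun acc2 q =>
        if q.2 = 1 then acc2 ++ [(p.1, q.1)] else acc2) acc)
    = fun acc p => acc ++ ((PySem.List.enumerate p.2).filter (fun q => decide (q.2 = 1))).map (fun q => (p.1, q.1)) from
      funext fun acc => funext fun p => by
        rw [show (fun (acc2 : List (Int × Int)) (q : Int × Int) =>
            if q.2 = 1 then acc2 ++ [(p.1, q.1)] else acc2)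
          = fun acc2 q => if (decide (q.2 = 1)) = true then acc2 ++ [(p.1, q.1)] else acc2 from
            funext fun acc2 => funext fun q => by simp]
        exact PySem.List.foldl_append_if _ _ _ _]
  exact PySem.List.foldl_append_eq_flatMap _ _ _

-- membership in A's coordinate list is exactly pvCell
theorem mem_pvServersOf (array : List (List Int)) (a b : Int) :
    ((a, b) ∈ pvServersOf array) ↔ pvCell array a b = true := by
  rw [pvServersOf_eq, pvCell_iff]
  simp only [List.mem_flatMap, List.mem_map, List.mem_filter, PySem.List.mem_enumerate_iff]
  constructor
  · rintro ⟨p, ⟨k, hk, rfl⟩, q, ⟨⟨l, hl, rfl⟩, hq1⟩, hab⟩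
    simp only [zero_add, decide_eq_true_eq] at hq1 hab ⊢
    obtain ⟨ha, hb⟩ := Prod.mk.injEq _ _ _ _ ▸ hab
    exact ⟨k, hk, l, hl, hq1, ha.symm, hb.symm⟩
  · rintro ⟨k, hk, l, hl, hv, rfl, rfl⟩
    exact ⟨((k : Int), array[k]), ⟨k, hk, by simp⟩,
      ((l : Int), array[k][l]), ⟨⟨l, hl, by simp⟩, by simpa using hv⟩, by simp⟩


-- generic: membership through a fold whose step only accumulates
theorem mem_foldl_of_step {α β : Type} [BEq α] [LawfulBEq α]
    (step : PySem.Set α → β → PySem.Set α) (C : β → α → Prop)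
    (hstep : ∀ s b y, y ∈ step s b ↔ y ∈ s ∨ C b y) :
    ∀ (l : List β) (s : PySem.Set α) (y : α),
      y ∈ l.foldl step s ↔ y ∈ s ∨ ∃ b ∈ l, C b y := by
  intro l
  induction l with
  | nil => simp
  | cons b t ih =>
    intro s y
    rw [List.foldl_cons, ih, hstep]
    simp only [List.mem_cons]
    constructor
    · rintro ((h | h) | ⟨c, hc, h⟩)
      · exact Or.inl h
      · exact Or.inr ⟨b, Or.inl rfl, h⟩
      · exact Or.inr ⟨c, Or.inr hc, h⟩
    · rintro (h | ⟨c, (rfl | hc), h⟩)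
      · exact Or.inl (Or.inl h)
      · exact Or.inl (Or.inr h)
      · exact Or.inr ⟨c, hc, h⟩

-- generic: a fold whose step preserves Nodup preserves Nodup
theorem nodup_foldl_of_step {α β : Type} [BEq α]
    (step : PySem.Set α → β → PySem.Set α)
    (hstep : ∀ s b, List.Nodup s → List.Nodup (step s b)) :
    ∀ (l : List β) (s : PySem.Set α), List.Nodup s → List.Nodup (l.foldl step s) := by
  intro l
  induction l with
  | nil => intro s h; exact h
  | cons b t ih => intro s h; exact ih _ (hstep _ _ h)





theorem mem_pvHoriz_raw (array : List (List Int)) (y : Int × Int) :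
    y ∈ pvHoriz array ↔ ∃ p ∈ PySem.List.enumerate array,
      ∃ j ∈ PySem.List.pyRange 0 ((p.2.length : Int) - 1) 1,
        (PySem.List.pyGetD p.2 j 0 = 1 ∧ PySem.List.pyGetD p.2 (j + 1) 0 = 1) ∧
        (y = (p.1, j) ∨ y = (p.1, j + 1)) := by
  unfold pvHoriz
  rw [mem_foldl_of_step _
    (fun p y => ∃ j ∈ PySem.List.pyRange 0 ((p.2.length : Int) - 1) 1,
      (PySem.List.pyGetD p.2 j 0 = 1 ∧ PySem.List.pyGetD p.2 (j + 1) 0 = 1) ∧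
      (y = (p.1, j) ∨ y = (p.1, j + 1)))
    (fun s p y => by
      rw [mem_foldl_of_step _
        (fun j y => (PySem.List.pyGetD p.2 j 0 = 1 ∧ PySem.List.pyGetD p.2 (j + 1) 0 = 1) ∧
          (y = (p.1, j) ∨ y = (p.1, j + 1)))
        (fun s2 j y => by
          split_ifs with h
          · simp only [PySem.Set.mem_add]
            constructor
            · rintro ((hy | hy) | hy)
              · exact Or.inl hy
              · exact Or.inr ⟨h, Or.inl hy⟩
              · exact Or.inr ⟨h, Or.inr hy⟩
            · rintro (hy | ⟨_, (hy | hy)⟩)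
              · exact Or.inl (Or.inl hy)
              · exact Or.inl (Or.inr hy)
              · exact Or.inr hy
          · simp [h])])]
  simp [PySem.Set.empty]

theorem mem_pvVert_raw (array : List (List Int)) (s0 : PySem.Set (Int × Int)) (y : Int × Int) :
    y ∈ pvVert array s0 ↔ y ∈ s0 ∨ ∃ i ∈ PySem.List.pyRange 0 ((array.length : Int) - 1) 1,
      ∃ j ∈ PySem.List.pyRange 0
        (min ((PySem.List.pyGetD array i []).length : Int) ((PySem.List.pyGetD array (i + 1) []).length : Int)) 1,
        (PySem.List.pyGetD (PySem.List.pyGetD array i []) j 0 = 1 ∧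
         PySem.List.pyGetD (PySem.List.pyGetD array (i + 1) []) j 0 = 1) ∧
        (y = (i, j) ∨ y = (i + 1, j)) := by
  unfold pvVert
  rw [mem_foldl_of_step _
    (fun i y => ∃ j ∈ PySem.List.pyRange 0
        (min ((PySem.List.pyGetD array i []).length : Int) ((PySem.List.pyGetD array (i + 1) []).length : Int)) 1,
        (PySem.List.pyGetD (PySem.List.pyGetD array i []) j 0 = 1 ∧
         PySem.List.pyGetD (PySem.List.pyGetD array (i + 1) []) j 0 = 1) ∧
        (y = (i, j) ∨ y = (i + 1, j)))
    (fun s i y => by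
      show y ∈ (PySem.List.pyRange 0 _ 1).foldl _ s ↔ _
      rw [mem_foldl_of_step _
        (fun j y => (PySem.List.pyGetD (PySem.List.pyGetD array i []) j 0 = 1 ∧
            PySem.List.pyGetD (PySem.List.pyGetD array (i + 1) []) j 0 = 1) ∧
          (y = (i, j) ∨ y = (i + 1, j)))
        (fun s2 j y => by
          split_ifs with h
          · simp only [PySem.Set.mem_add]
            constructor
            · rintro ((hy | hy) | hy)
              · exact Or.inl hy
              · exact Or.inr ⟨h, Or.inl hy⟩
              · exact Or.inr ⟨h, Or.inr hy⟩
            · rintro (hy | ⟨_, (hy | hy)⟩)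
              · exact Or.inl (Or.inl hy)
              · exact Or.inl (Or.inr hy)
              · exact Or.inr hy
          · simp [h])])]

theorem mem_pvHoriz (array : List (List Int)) (a b : Int) :
    ((a, b) ∈ pvHoriz array) ↔
      ((pvCell array a b = true ∧ pvCell array a (b + 1) = true) ∨
       (pvCell array a b = true ∧ pvCell array a (b - 1) = true)) := by
  rw [mem_pvHoriz_raw]
  constructor
  · rintro ⟨p, hp, j, hj, ⟨h1, h2⟩, hy⟩
    rw [PySem.List.mem_enumerate_iff] at hp
    obtain ⟨k, hk, rfl⟩ := hp
    rw [PySem.List.mem_pyRange_one] at hj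
    obtain ⟨l, rfl⟩ : ∃ l : Nat, j = (l : Int) := ⟨j.toNat, by omega⟩
    simp only [zero_add] at h1 h2 hj hy
    have hlen : l + 1 < array[k].length := by
      have h2' := hj.2
      omega
    rw [PySem.List.pyGetD_natCast, List.getD_eq_getElem _ 0 (by omega)] at h1
    rw [show ((l : Int) + 1) = ((l + 1 : Nat) : Int) by push_cast; ring,
      PySem.List.pyGetD_natCast, List.getD_eq_getElem _ 0 hlen] at h2
    rcases hy with hy | hy <;> (rw [Prod.mk.injEq] at hy; obtain ⟨rfl, rfl⟩ := hy)
    · exact Or.inl ⟨pvCell_iff _ _ _ |>.2 ⟨k, hk, l, by omega, h1, rfl, rfl⟩,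
        pvCell_iff _ _ _ |>.2 ⟨k, hk, l + 1, hlen, h2, rfl, by push_cast; ring⟩⟩
    · exact Or.inr ⟨pvCell_iff _ _ _ |>.2 ⟨k, hk, l + 1, hlen, h2, rfl, by push_cast; ring⟩,
        pvCell_iff _ _ _ |>.2 ⟨k, hk, l, by omega, h1, rfl, by omega⟩⟩
  · rintro (⟨hs, hn⟩ | ⟨hs, hn⟩) <;>
      (rw [pvCell_iff] at hs hn;
       obtain ⟨k, hk, l, hl, hv, rfl, rfl⟩ := hs;
       obtain ⟨k2, hk2, l2, hl2, hv2, hkk, hll⟩ := hn;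
       have hke : k2 = k := by exact_mod_cast hkk.symm;
       subst hke)
    · obtain rfl : l2 = l + 1 := by omega
      refine ⟨((k2 : Int), array[k2]), PySem.List.mem_enumerate_iff _ _ _ |>.2 ⟨k2, hk, by simp⟩,
        (l : Int), PySem.List.mem_pyRange_one.2 ⟨by omega, by simp; omega⟩, ⟨?_, ?_⟩, Or.inl rfl⟩
      · rw [PySem.List.pyGetD_natCast, List.getD_eq_getElem _ 0 (by omega)]; exact hv
      · rw [show ((l : Int) + 1) = ((l + 1 : Nat) : Int) by push_cast; ring,
          PySem.List.pyGetD_natCast, List.getD_eq_getElem _ 0 hl2]; exact hv2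
    · obtain rfl : l = l2 + 1 := by omega
      refine ⟨((k2 : Int), array[k2]), PySem.List.mem_enumerate_iff _ _ _ |>.2 ⟨k2, hk, by simp⟩,
        (l2 : Int), PySem.List.mem_pyRange_one.2 ⟨by omega, by simp; omega⟩, ⟨?_, ?_⟩,
        Or.inr (by push_cast; ring_nf)⟩
      · rw [PySem.List.pyGetD_natCast, List.getD_eq_getElem _ 0 (by omega)]; exact hv2
      · rw [show ((l2 : Int) + 1) = ((l2 + 1 : Nat) : Int) by push_cast; ring,
          PySem.List.pyGetD_natCast, List.getD_eq_getElem _ 0 hl]; exact hv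

theorem mem_pvVert (array : List (List Int)) (s0 : PySem.Set (Int × Int)) (a b : Int) :
    ((a, b) ∈ pvVert array s0) ↔
      ((a, b) ∈ s0 ∨
       (pvCell array a b = true ∧ pvCell array (a + 1) b = true) ∨
       (pvCell array a b = true ∧ pvCell array (a - 1) b = true)) := by
  rw [mem_pvVert_raw]
  refine or_congr Iff.rfl ?_
  constructor
  · rintro ⟨i, hi, j, hj, ⟨h1, h2⟩, hy⟩
    rw [PySem.List.mem_pyRange_one] at hi hj
    obtain ⟨k, rfl⟩ : ∃ k : Nat, i = (k : Int) := ⟨i.toNat, by omega⟩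
    obtain ⟨l, rfl⟩ : ∃ l : Nat, j = (l : Int) := ⟨j.toNat, by omega⟩
    have hk1 : k + 1 < array.length := by
      have := hi.2; omega
    have e1 : PySem.List.pyGetD array (k : Int) [] = array[k] := by
      rw [PySem.List.pyGetD_natCast, List.getD_eq_getElem _ [] (by omega)]
    have e2 : PySem.List.pyGetD array ((k : Int) + 1) [] = array[k + 1] := by
      rw [show ((k : Int) + 1) = ((k + 1 : Nat) : Int) by push_cast; ring,
        PySem.List.pyGetD_natCast, List.getD_eq_getElem _ [] hk1]
    rw [e1] at h1 hj
    rw [e2] at h2 hj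
    have hl1 : l < array[k].length := by omega
    have hl2 : l < array[k + 1].length := by omega
    rw [PySem.List.pyGetD_natCast, List.getD_eq_getElem _ 0 hl1] at h1
    rw [PySem.List.pyGetD_natCast, List.getD_eq_getElem _ 0 hl2] at h2
    rcases hy with hy | hy <;> (rw [Prod.mk.injEq] at hy; obtain ⟨rfl, rfl⟩ := hy)
    · exact Or.inl ⟨pvCell_iff _ _ _ |>.2 ⟨k, by omega, l, hl1, h1, rfl, rfl⟩,
        pvCell_iff _ _ _ |>.2 ⟨k + 1, hk1, l, hl2, h2, by push_cast; ring, rfl⟩⟩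
    · exact Or.inr ⟨pvCell_iff _ _ _ |>.2 ⟨k + 1, hk1, l, hl2, h2, by push_cast; ring, rfl⟩,
        pvCell_iff _ _ _ |>.2 ⟨k, by omega, l, hl1, h1, by omega, rfl⟩⟩
  · rintro (⟨hs, hn⟩ | ⟨hs, hn⟩) <;>
      (rw [pvCell_iff] at hs hn;
       obtain ⟨k, hk, l, hl, hv, rfl, rfl⟩ := hs;
       obtain ⟨k2, hk2, l2, hl2, hv2, hkk, hll⟩ := hn;
       obtain rfl : l2 = l := by omega)
    · obtain rfl : k2 = k + 1 := by omega
      have e1 : PySem.List.pyGetD array (k : Int) [] = array[k] := by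
        rw [PySem.List.pyGetD_natCast, List.getD_eq_getElem _ [] (by omega)]
      have e2 : PySem.List.pyGetD array ((k : Int) + 1) [] = array[k + 1] := by
        rw [show ((k : Int) + 1) = ((k + 1 : Nat) : Int) by push_cast; ring,
          PySem.List.pyGetD_natCast, List.getD_eq_getElem _ [] hk2]
      refine ⟨(k : Int), PySem.List.mem_pyRange_one.2 ⟨by omega, by omega⟩,
        (l2 : Int), PySem.List.mem_pyRange_one.2 ⟨by omega, ?_⟩, ⟨?_, ?_⟩, Or.inl rfl⟩
      · rw [e1, e2]; omega
      · rw [e1, PySem.List.pyGetD_natCast, List.getD_eq_getElem _ 0 hl]; exact hv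
      · rw [e2, PySem.List.pyGetD_natCast, List.getD_eq_getElem _ 0 hl2]; exact hv2
    · have hke : k = k2 + 1 := by omega
      subst hke
      have e1 : PySem.List.pyGetD array (k2 : Int) [] = array[k2] := by
        rw [PySem.List.pyGetD_natCast, List.getD_eq_getElem _ [] hk2]
      have e2 : PySem.List.pyGetD array ((k2 : Int) + 1) [] = array[k2 + 1] := by
        rw [show ((k2 : Int) + 1) = ((k2 + 1 : Nat) : Int) by push_cast; ring,
          PySem.List.pyGetD_natCast, List.getD_eq_getElem _ [] hk]
      refine ⟨(k2 : Int), PySem.List.mem_pyRange_one.2 ⟨by omega, by omega⟩,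
        (l2 : Int), PySem.List.mem_pyRange_one.2 ⟨by omega, ?_⟩, ⟨?_, ?_⟩,
        Or.inr (by rw [Prod.mk.injEq]; omega)⟩
      · rw [e1, e2]; omega
      · rw [e1, PySem.List.pyGetD_natCast, List.getD_eq_getElem _ 0 hl2]; exact hv2
      · rw [e2, PySem.List.pyGetD_natCast, List.getD_eq_getElem _ 0 hl]; exact hv

theorem mem_pvComm' (array : List (List Int)) (a b : Int) :
    ((a, b) ∈ pvVert array (pvHoriz array)) ↔
      (pvCell array a b = true ∧
        (pvCell array a (b + 1) = true ∨ pvCell array a (b - 1) = true ∨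
         pvCell array (a + 1) b = true ∨ pvCell array (a - 1) b = true)) := by
  rw [mem_pvVert, mem_pvHoriz]
  tauto

theorem nodup_pvComm' (array : List (List Int)) : (pvVert array (pvHoriz array)).Nodup := by
  unfold pvVert
  refine nodup_foldl_of_step _ (fun s i h => ?_) _ _ ?_
  · exact nodup_foldl_of_step _ (fun s2 j h2 => by
      split_ifs with hc
      · exact PySem.Set.nodup_add _ _ (PySem.Set.nodup_add _ _ h2)
      · exact h2) _ _ h
  · unfold pvHoriz
    refine nodup_foldl_of_step _ (fun s p h => ?_) _ _ List.nodup_nil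
    exact nodup_foldl_of_step _ (fun s2 j h2 => by
      split_ifs with hc
      · exact PySem.Set.nodup_add _ _ (PySem.Set.nodup_add _ _ h2)
      · exact h2) _ _ h

theorem nodup_pvServersOf' (array : List (List Int)) : (pvServersOf array).Nodup := by
  rw [pvServersOf_eq, List.nodup_flatMap]
  constructor
  · intro p _
    have h2 := (PySem.List.pairwise_lt_enumerate p.2 0).filter (fun q => decide (q.2 = 1))
    exact h2.map _ (fun {a c} hac => by
      simp only [ne_eq, Prod.mk.injEq, not_and]
      intro _ h
      omega)
  · refine (PySem.List.pairwise_lt_enumerate array 0).imp ?_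
    intro p q hpq x hxp hxq
    simp only [List.mem_map] at hxp hxq
    obtain ⟨u, -, rfl⟩ := hxp
    obtain ⟨v, -, hv⟩ := hxq
    rw [Prod.mk.injEq] at hv
    omega

theorem pv_counts_eq' (array : List (List Int)) :
    get_number_of_communicating_servers array = get_number_of_communicating_servers_alt array := by
  have hA : get_number_of_communicating_servers array
      = (((pvServersOf array).countP (fun s =>
          decide ((s.1, s.2 + 1) ∈ pvServersOf array ∨ (s.1, s.2 - 1) ∈ pvServersOf array ∨
            (s.1 + 1, s.2) ∈ pvServersOf array ∨ (s.1 - 1, s.2) ∈ pvServersOf array)) : Nat) : Int) := by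
    unfold get_number_of_communicating_servers
    rw [show (fun (count : Int) (s : Int × Int) =>
        if (s.1, s.2 + 1) ∈ pvServersOf array ∨ (s.1, s.2 - 1) ∈ pvServersOf array ∨
           (s.1 + 1, s.2) ∈ pvServersOf array ∨ (s.1 - 1, s.2) ∈ pvServersOf array
        then count + 1 else count)
      = fun count s =>
        if (decide ((s.1, s.2 + 1) ∈ pvServersOf array ∨ (s.1, s.2 - 1) ∈ pvServersOf array ∨
           (s.1 + 1, s.2) ∈ pvServersOf array ∨ (s.1 - 1, s.2) ∈ pvServersOf array)) = true
        then count + 1 else count from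
        funext fun count => funext fun s => by simp only [decide_eq_true_eq]]
    rw [PySem.List.foldl_count_if]
    ring
  have hperm : (pvVert array (pvHoriz array)).Perm ((pvServersOf array).filter (fun s =>
      decide ((s.1, s.2 + 1) ∈ pvServersOf array ∨ (s.1, s.2 - 1) ∈ pvServersOf array ∨
        (s.1 + 1, s.2) ∈ pvServersOf array ∨ (s.1 - 1, s.2) ∈ pvServersOf array))) := by
    rw [List.perm_ext_iff_of_nodup (nodup_pvComm' array) ((nodup_pvServersOf' array).filter _)]
    rintro ⟨a, b⟩
    rw [List.mem_filter, mem_pvComm']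
    simp only [decide_eq_true_eq, mem_pvServersOf]
  rw [hA, List.countP_eq_length_filter]
  unfold get_number_of_communicating_servers_alt
  rw [hperm.length_eq]

-- ===== VERDICT (by name: the statement is the Claim_ definition above) =====
theorem get_number_of_communicating_servers_spec : Claim_equal_get_number_of_communicating_servers := by
  intro array _
  unfold Spec_get_number_of_communicating_servers
  exact pv_counts_eq' array
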